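-- pv_equiv track=rewrite | github.com/medmax33/Survivor | level18.py | MisterRobot
-- ===== SOURCE A (Python) =====
-- def MisterRobot(n: int, data: list) -> bool:
--
--     # check length of data
--     if n != len(data):
--         return False
--
--     # checking all n digits in data
--     for _ in range(n):
--         if _ + 1 in data:
--             continue
--         else:
--             return False
--
--     for i in range(1, n):
--         # do rotation while i is in zero position
--         while data[0] != i:
--             # if length of data is 2 and we have ex. [5, 4] -> False
--             if len(data) > 2:
--                 rotate(i, data)
--             else:
--                 return False
--         data.pop(0)
--
--     return True
--
-- def rotate(i: int, data: list) -> list: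
--     final = data.index(i)
--     if final >= 2:
--         start = final - 2
--     else:
--         start = 0
--     while data[start] != i:
--         data.insert(start + 2, data.pop(start))
--
--     return data
-- ===== SOURCE B (Python) =====
-- def MisterRobot(n: int, data: list) -> bool:
--     # data must be exactly the set {1..n}; then A's 3-element rotations can sort
--     # it iff the permutation has an even number of inversions.
--     if n != len(data) or set(data) != set(range(1, n + 1)):
--         return False
--     inv = 0
--     rest = list(data)
--     while rest:
--         x = rest.pop(0)
--         inv += sum(1 for y in rest if x > y)
--     return inv % 2 == 0
-- ===== Notes on version B (the rewrite author's own statement) =====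
-- stated objective: alternative
-- what changed: Replaces the step-by-step rotation simulation by a closed-form criterion: a set-equality membership check plus an inversion-parity count (a list is sortable by A's 3-rotations iff it is the permutation 1..n with an even number of inversions); B never simulates any rotation.
import Mathlib
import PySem

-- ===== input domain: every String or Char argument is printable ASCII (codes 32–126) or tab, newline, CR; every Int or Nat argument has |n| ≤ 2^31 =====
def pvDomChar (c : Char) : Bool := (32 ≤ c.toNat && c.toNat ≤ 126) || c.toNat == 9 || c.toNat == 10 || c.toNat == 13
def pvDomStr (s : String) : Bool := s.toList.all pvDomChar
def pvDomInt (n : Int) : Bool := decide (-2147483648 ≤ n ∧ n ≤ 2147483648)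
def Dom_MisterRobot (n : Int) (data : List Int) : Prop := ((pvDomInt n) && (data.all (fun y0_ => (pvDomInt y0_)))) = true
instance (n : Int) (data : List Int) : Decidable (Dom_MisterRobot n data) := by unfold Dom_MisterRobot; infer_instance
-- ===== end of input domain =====

-- B replaces A's step-by-step rotation simulation by a closed-form check (is `data` the
-- permutation 1..n, and is its inversion count even).  Python A mutates `data` in place
-- (it pops it empty on success); the equivalence proved here is about the RETURN value
-- only — B does not mutate its argument.

-- ===== PORT A =====
-- inner while of Python's `rotate`: `while data[start] != i: data.insert(start+2, data.pop(start))`.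
-- The fuel only bounds the iterations; it is never exhausted on the states A reaches.
def rotateAux (i : Int) (start : Nat) (data : List Int) : Nat → List Int
  | 0 => data
  | fuel + 1 =>
    match PySem.List.pyGet? data (start : Int) with
    | none => data
    | some v =>
      if v ≠ i then
        match PySem.List.pop? data (start : Int) with
        | none => data
        | some (x, rest) => rotateAux i start (PySem.List.insert rest ((start : Int) + 2) x) fuel
      else data

-- Python `rotate`: raises ValueError if i is absent (unreachable from MisterRobot's call sites)
def rotate (i : Int) (data : List Int) : List Int :=
  match PySem.List.index? data i with
  | none => data
  | some final =>
    let start : Nat := if final ≥ 2 then final - 2 else 0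
    rotateAux i start data (data.length + 1)

-- inner while of `MisterRobot`; `none` is Python's `return False`.
-- Fuel is never exhausted on reachable states (the index of i strictly decreases).
def mrWhile (i : Int) (data : List Int) : Nat → Option (List Int)
  | 0 => none
  | fuel + 1 =>
    match PySem.List.pyGet? data 0 with
    | none => some data
    | some v =>
      if v ≠ i then
        if data.length > 2 then mrWhile i (rotate i data) fuel
        else none
      else some data

-- the `for i in range(1, n)` loop with its early `return False` and the `data.pop(0)`
def mrFor : List Int → List Int → Bool
  | [], _ => true
  | i :: is, data =>
    match mrWhile i data (data.length + 1) with
    | none => false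
    | some d =>
      match PySem.List.pop? d 0 with
      | none => false
      | some (_, rest) => mrFor is rest

def MisterRobot (n : Int) (data : List Int) : Bool :=
  if n ≠ (data.length : Int) then false
  else if ¬ ((PySem.List.pyRange 0 n 1).all fun k => data.contains (k + 1)) then false
  else mrFor (PySem.List.pyRange 1 n 1) data

-- ===== PORT B =====
-- the `while rest: x = rest.pop(0); inv += sum(1 for y in rest if x > y)` loop of Source B
def invCount : List Int → Nat
  | [] => 0
  | x :: rest => rest.countP (fun y => decide (x > y)) + invCount rest

def MisterRobot_alt (n : Int) (data : List Int) : Bool :=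
  if n ≠ (data.length : Int) ∨
     ¬ (PySem.Set.equal (PySem.Set.ofList data)
          (PySem.Set.ofList (PySem.List.pyRange 1 (n + 1) 1)) = true) then false
  else decide (invCount data % 2 = 0)


-- ===== PRECONDITION & SPEC =====
def Spec_MisterRobot (n : Int) (data : List Int) (out : Bool) : Prop := out = MisterRobot_alt n data
instance (n : Int) (data : List Int) (out : Bool) : Decidable (Spec_MisterRobot n data out) := by unfold Spec_MisterRobot; infer_instance

-- ===== CLAIM (what is proved, stated in full; the proofs are below) =====
def Claim_equal_MisterRobot : Prop := ∀ (n : Int) (data : List Int), Dom_MisterRobot n data → Spec_MisterRobot n data (MisterRobot n data)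

-- ===== LEMMAS AND PROOFS =====

lemma invCount_cons_min (x : Int) (rest : List Int) (h : ∀ y ∈ rest, ¬ x > y) :
    invCount (x :: rest) = invCount rest := by
  have h0 : rest.countP (fun y => decide (x > y)) = 0 :=
    List.countP_eq_zero.mpr (by intro y hy; simpa using h y hy)
  simp [invCount, h0]

lemma invCount_swap (l : List Int) (x y : Int) (r : List Int) (hxy : x ≠ y) :
    (invCount (l ++ x :: y :: r) + invCount (l ++ y :: x :: r)) % 2 = 1 := by
  induction l with
  | nil =>
    simp only [List.nil_append, invCount, List.countP_cons]
    rcases lt_trichotomy x y with h | h | h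
    · simp [h, not_lt.mpr h.le]; omega
    · exact absurd h hxy
    · simp [h, not_lt.mpr h.le]; omega
  | cons h t ih =>
    have hp : (x :: y :: r).Perm (y :: x :: r) := List.Perm.swap y x r
    have hc := (hp.append_left t).countP_eq (p := fun z => decide (h > z))
    simp only [List.cons_append, invCount]
    omega

lemma invCount_rot_upper (l : List Int) (a b i : Int) (r : List Int)
    (ha : a ≠ i) (hb : b ≠ i) :
    invCount (l ++ i :: a :: b :: r) % 2 = invCount (l ++ a :: b :: i :: r) % 2 := by
  have h1 := invCount_swap (l ++ [a]) b i r hb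
  have h2 := invCount_swap l a i (b :: r) ha
  simp only [List.append_assoc, List.cons_append, List.nil_append] at h1
  omega

lemma invCount_rot_low (a i c : Int) (r : List Int) (ha : a ≠ i) (hac : a ≠ c) :
    invCount (i :: c :: a :: r) % 2 = invCount (a :: i :: c :: r) % 2 := by
  have h1 := invCount_swap [] a i (c :: r) ha
  have h2 := invCount_swap [i] a c r hac
  simp only [List.nil_append, List.cons_append, List.nil_append] at h1 h2
  omega

lemma insert_natCast (xs : List Int) (k : Nat) (v : Int) (h : k ≤ xs.length) :
    PySem.List.insert xs (k : Int) v = xs.take k ++ v :: xs.drop k := by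
  simp only [PySem.List.insert, PySem.List.sliceIndices]
  norm_num
  rw [if_neg (by omega), min_eq_left (by exact_mod_cast h)]
  simp

lemma rotateAux_succ_eq (l : List Int) (i : Int) (z : List Int) (fuel : Nat) :
    rotateAux i l.length (l ++ i :: z) (fuel + 1) = l ++ i :: z := by
  have hget : PySem.List.pyGet? (l ++ i :: z) (l.length : Int) = some i := by
    rw [PySem.List.pyGet?_natCast, List.getElem?_append_right le_rfl]; simp
  simp only [rotateAux, hget, ite_eq_right_iff]
  intro h
  exact absurd rfl h

lemma rotateAux_succ_ne (l : List Int) (x i : Int) (z : List Int) (fuel : Nat)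
    (hx : x ≠ i) (hz : 2 ≤ z.length) :
    rotateAux i l.length (l ++ x :: z) (fuel + 1)
      = rotateAux i l.length (l ++ z.take 2 ++ x :: z.drop 2) fuel := by
  have hget : PySem.List.pyGet? (l ++ x :: z) (l.length : Int) = some x := by
    rw [PySem.List.pyGet?_natCast, List.getElem?_append_right le_rfl]; simp
  have hlt : l.length < (l ++ x :: z).length := by simp
  have hpop : PySem.List.pop? (l ++ x :: z) (l.length : Int)
      = some (x, l ++ z) := by
    rw [PySem.List.pop?_natCast _ _ hlt]
    congr 1
    refine Prod.ext ?_ ?_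
    · rw [List.getElem_append_right le_rfl]; simp
    · rw [List.eraseIdx_append_of_length_le le_rfl]; simp
  have hins : PySem.List.insert (l ++ z) ((l.length : Int) + 2) x
      = l ++ z.take 2 ++ x :: z.drop 2 := by
    have : ((l.length : Int) + 2) = ((l.length + 2 : Nat) : Int) := by push_cast; ring
    rw [this, insert_natCast _ _ _ (by simp; omega)]
    rw [List.take_append, List.drop_append,
      List.take_of_length_le (by omega), List.drop_of_length_le (by omega)]
    simp [List.append_assoc]
  simp [rotateAux, hx, hpop, hins]

lemma rotateAux_upper (l : List Int) (a b i : Int) (r : List Int)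
    (ha : a ≠ i) (hb : b ≠ i) (fuel : Nat) (hf : 3 ≤ fuel) :
    rotateAux i l.length (l ++ a :: b :: i :: r) fuel = l ++ i :: a :: b :: r := by
  obtain ⟨f, rfl⟩ : ∃ f, fuel = f + 3 := ⟨fuel - 3, by omega⟩
  have s1 : rotateAux i l.length (l ++ a :: b :: i :: r) (f + 2 + 1)
      = rotateAux i l.length (l ++ b :: i :: a :: r) (f + 2) := by
    simpa using rotateAux_succ_ne l a i (b :: i :: r) (f + 2) ha (by simp)
  have s2 : rotateAux i l.length (l ++ b :: i :: a :: r) (f + 1 + 1)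
      = rotateAux i l.length (l ++ i :: a :: b :: r) (f + 1) := by
    simpa using rotateAux_succ_ne l b i (i :: a :: r) (f + 1) hb (by simp)
  have s3 := rotateAux_succ_eq l i (a :: b :: r) f
  calc rotateAux i l.length (l ++ a :: b :: i :: r) (f + 3)
      = rotateAux i l.length (l ++ b :: i :: a :: r) (f + 2) := s1
    _ = rotateAux i l.length (l ++ i :: a :: b :: r) (f + 1) := s2
    _ = l ++ i :: a :: b :: r := s3

lemma rotateAux_low (a i c : Int) (r : List Int) (ha : a ≠ i) (fuel : Nat) (hf : 2 ≤ fuel) :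
    rotateAux i 0 (a :: i :: c :: r) fuel = i :: c :: a :: r := by
  obtain ⟨f, rfl⟩ : ∃ f, fuel = f + 2 := ⟨fuel - 2, by omega⟩
  have s1 : rotateAux i ([] : List Int).length ([] ++ a :: i :: c :: r) (f + 1 + 1)
      = rotateAux i ([] : List Int).length ([] ++ i :: c :: a :: r) (f + 1) := by
    simpa using rotateAux_succ_ne [] a i (i :: c :: r) (f + 1) ha (by simp)
  have s2 := rotateAux_succ_eq [] i (c :: a :: r) f
  simp only [List.nil_append, List.length_nil] at s1 s2
  calc rotateAux i 0 (a :: i :: c :: r) (f + 2) = rotateAux i 0 (i :: c :: a :: r) (f + 1) := s1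
    _ = i :: c :: a :: r := s2

lemma exists_last_two {α : Type} (pre : List α) (h : 2 ≤ pre.length) :
    ∃ l a b, pre = l ++ [a, b] := by
  match hrev : pre.reverse with
  | [] =>
    have hp : pre = [] := by simpa using congrArg List.reverse hrev
    simp [hp] at h
  | [x] =>
    have hp : pre = [x] := by simpa using congrArg List.reverse hrev
    simp [hp] at h
  | b :: a :: t =>
    refine ⟨t.reverse, a, b, ?_⟩
    have := congrArg List.reverse hrev
    simpa using this

lemma rotate_spec (i : Int) (data : List Int) (hnd : data.Nodup)
    (f : Nat) (hidx : PySem.List.index? data i = some f) (hf : 1 ≤ f)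
    (hlen : 3 ≤ data.length) :
    (rotate i data).Perm data ∧
    invCount (rotate i data) % 2 = invCount data % 2 ∧
    (∃ f', PySem.List.index? (rotate i data) i = some f' ∧ f' < f) := by
  obtain ⟨pre, suf, hdata, hprelen, hnotin⟩ := (PySem.List.index?_eq_some_iff data i f).mp hidx
  by_cases h2 : 2 ≤ f
  · obtain ⟨l, a, b, hpre⟩ := exists_last_two pre (by omega)
    have ha : a ≠ i := fun h => hnotin (by simp [hpre, h])
    have hb : b ≠ i := fun h => hnotin (by simp [hpre, h])
    have hshape : data = l ++ a :: b :: i :: suf := by simp [hdata, hpre]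
    have hstart : f - 2 = l.length := by
      have := hprelen; rw [hpre] at this; simp at this; omega
    have hrot : rotate i data = l ++ i :: a :: b :: suf := by
      simp only [rotate, hidx]
      rw [if_pos h2, hstart, hshape]
      exact rotateAux_upper l a b i suf ha hb _ (by simp; omega)
    have hperm : (rotate i data).Perm data := by
      rw [hrot, hshape]
      exact List.Perm.append_left l (by simpa using (List.perm_middle (a := i) (l₁ := [a, b]) (l₂ := suf)).symm)
    refine ⟨hperm, ?_, ?_⟩
    · rw [hrot, hshape]; exact invCount_rot_upper l a b i suf ha hb
    · refine ⟨l.length, ?_, by omega⟩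
      rw [hrot]
      exact (PySem.List.index?_eq_some_iff _ _ _).mpr
        ⟨l, a :: b :: suf, rfl, rfl, fun h => hnotin (by simp [hpre, h])⟩
  · have hf1 : f = 1 := by omega
    obtain ⟨a, hpre⟩ : ∃ a, pre = [a] := by
      cases pre with
      | nil => simp [hf1] at hprelen
      | cons x t => cases t with
        | nil => exact ⟨x, rfl⟩
        | cons y u => rw [hf1] at hprelen; simp at hprelen
    have ha : a ≠ i := fun h => hnotin (by simp [hpre, h])
    obtain ⟨c, r, hsuf⟩ : ∃ c r, suf = c :: r := by
      cases suf with
      | nil => rw [hdata, hpre] at hlen; simp at hlen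
      | cons c r => exact ⟨c, r, rfl⟩
    have hshape : data = a :: i :: c :: r := by simp [hdata, hpre, hsuf]
    have hac : a ≠ c := by
      rw [hshape] at hnd
      have := (List.nodup_cons.mp hnd).1
      simp at this; tauto
    have hrot : rotate i data = i :: c :: a :: r := by
      simp only [rotate, hidx]
      rw [if_neg (by omega), hshape]
      exact rotateAux_low a i c r ha _ (by simp)
    refine ⟨?_, ?_, ?_⟩
    · rw [hrot, hshape]
      simpa using (List.perm_middle (a := a) (l₁ := [i, c]) (l₂ := r))
    · rw [hrot, hshape]; exact invCount_rot_low a i c r ha hac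
    · refine ⟨0, ?_, by omega⟩
      rw [hrot]
      exact PySem.List.index?_cons_self _ _

lemma mrWhile_reach (i : Int) : ∀ (fuel : Nat) (data : List Int), data.Nodup → i ∈ data →
    3 ≤ data.length → (∀ f, PySem.List.index? data i = some f → f < fuel) →
    ∃ rest, mrWhile i data fuel = some (i :: rest) ∧ (i :: rest).Perm data ∧
      invCount (i :: rest) % 2 = invCount data % 2 := by
  intro fuel
  induction fuel with
  | zero =>
    intro data hnd hmem hlen hidx
    have hs : (PySem.List.index? data i).isSome = true :=
      (PySem.List.index?_isSome_iff data i).mpr hmem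
    obtain ⟨f, hf⟩ := Option.isSome_iff_exists.mp hs
    exact absurd (hidx f hf) (by omega)
  | succ fuel ih =>
    intro data hnd hmem hlen hidx
    match data with
    | d₀ :: t =>
      by_cases hd : d₀ = i
      · subst hd
        exact ⟨t, by simp [mrWhile], List.Perm.refl _, rfl⟩
      · have hs : (PySem.List.index? (d₀ :: t) i).isSome = true :=
          (PySem.List.index?_isSome_iff _ i).mpr hmem
        obtain ⟨f, hf⟩ := Option.isSome_iff_exists.mp hs
        have hf1 : 1 ≤ f := by
          rcases Nat.eq_zero_or_pos f with h0 | h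
          · obtain ⟨pre, suf, hdd, hpl, _⟩ := (PySem.List.index?_eq_some_iff _ _ _).mp hf
            rw [h0] at hpl
            have : pre = [] := List.length_eq_zero_iff.mp hpl
            rw [this] at hdd; simp at hdd
            exact absurd hdd.1 hd
          · exact h
        obtain ⟨hperm, hpar, f', hf', hflt⟩ := rotate_spec i (d₀ :: t) hnd f hf hf1 hlen
        have hrec := ih (rotate i (d₀ :: t)) (hperm.nodup_iff.mpr hnd)
          (hperm.mem_iff.mpr hmem) (hperm.length_eq ▸ hlen)
          (by intro g hg
              rw [hf'] at hg
              injection hg with hgv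
              have := hidx f hf
              omega)
        obtain ⟨rest, h1, h2, h3⟩ := hrec
        refine ⟨rest, ?_, h2.trans hperm, by rw [h3, hpar]⟩
        have ht : 2 ≤ t.length := by
          have := hlen; simp at this; omega
        simp [mrWhile, hd]
        exact ⟨ht, h1⟩

lemma mrFor_spec (m : Int) : ∀ (k : Nat) (i : Int) (data : List Int), (m - i).toNat = k →
    1 ≤ i → i ≤ m → data.Nodup → (∀ x, x ∈ data ↔ i ≤ x ∧ x ≤ m) →
    mrFor (PySem.List.pyRange i m) data = decide (invCount data % 2 = 0) := by
  intro k
  induction k using Nat.strong_induction_on with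
  | _ k ih =>
    intro i data hk h1 him hnd hmem
    have hperm : data.Perm (PySem.List.pyRange i (m + 1)) :=
      (List.perm_ext_iff_of_nodup hnd (PySem.List.nodup_pyRange_one _ _)).mpr
        (by intro x; rw [hmem x, PySem.List.mem_pyRange_one]; omega)
    have hlen : data.length = (m + 1 - i).toNat := by
      rw [hperm.length_eq, PySem.List.length_pyRange_one]
    by_cases him2 : m ≤ i
    · have hieq : i = m := le_antisymm him him2
      rw [PySem.List.pyRange_one_eq_nil (by omega)]
      have hone : data = [m] := by
        apply List.perm_singleton.mp
        have hp2 := hperm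
        rw [hieq, PySem.List.pyRange_one_singleton] at hp2
        exact hp2
      rw [hone]
      simp [mrFor, invCount]
    · rw [PySem.List.pyRange_one_cons (by omega)]
      by_cases hl3 : 3 ≤ data.length
      · have hmemi : i ∈ data := (hmem i).mpr ⟨le_refl i, by omega⟩
        have hidxb : ∀ f, PySem.List.index? data i = some f → f < data.length + 1 := by
          intro f hf
          obtain ⟨pre, suf, hd, hpl, _⟩ := (PySem.List.index?_eq_some_iff _ _ _).mp hf
          rw [hd]; simp; omega
        obtain ⟨rest, hw, hp, hpar⟩ := mrWhile_reach i (data.length + 1) data hnd hmemi hl3 hidxb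
        have hnodup2 : (i :: rest).Nodup := hp.nodup_iff.mpr hnd
        have hir : i ∉ rest := (List.nodup_cons.mp hnodup2).1
        have hndr : rest.Nodup := (List.nodup_cons.mp hnodup2).2
        have hmemr : ∀ x, x ∈ rest ↔ i + 1 ≤ x ∧ x ≤ m := by
          intro x
          constructor
          · intro hx
            have hxd : x ∈ data := hp.mem_iff.mp (List.mem_cons_of_mem _ hx)
            have hxb := (hmem x).mp hxd
            have hxi : x ≠ i := fun h => hir (h ▸ hx)
            omega
          · intro hx
            have hxd : x ∈ data := (hmem x).mpr ⟨by omega, hx.2⟩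
            rcases List.mem_cons.mp (hp.mem_iff.mpr hxd) with h | h
            · exfalso; omega
            · exact h
        have hi1m : i + 1 ≤ m := by
          rw [hlen] at hl3; omega
        have hrec := ih (m - (i + 1)).toNat (by omega) (i + 1) rest rfl (by omega) hi1m hndr hmemr
        have hmin : invCount (i :: rest) = invCount rest :=
          invCount_cons_min _ _ (by intro y hy; have := (hmemr y).mp hy; omega)
        have hpar2 : invCount rest % 2 = invCount data % 2 := by rw [← hmin, hpar]
        simp only [mrFor, hw, PySem.List.pop?_zero_cons]
        rw [hrec, show invCount rest % 2 = invCount data % 2 from hpar2]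
      · have hm : m = i + 1 := by rw [hlen] at hl3; omega
        have hperm2 : data.Perm [i, i + 1] := by
          have hr : PySem.List.pyRange i (m + 1) = [i, i + 1] := by
            rw [hm, PySem.List.pyRange_one_cons (by omega),
              PySem.List.pyRange_one_cons (by omega), PySem.List.pyRange_one_eq_nil (by omega)]
          exact hr ▸ hperm
        have hlen2 : data.length = 2 := by rw [hlen]; omega
        match data, hlen2 with
        | [x, y], _ =>
          have hx : x ∈ [i, i+1] := hperm2.mem_iff.mp (by simp)
          have hy : y ∈ [i, i+1] := hperm2.mem_iff.mp (by simp)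
          have hxy : x ≠ y := by
            have := List.nodup_cons.mp hnd
            simp at this; tauto
          rw [PySem.List.pyRange_one_eq_nil (by omega)]
          simp only [List.mem_cons, List.not_mem_nil, or_false] at hx hy
          rcases hx with hx | hx
          · have hyv : y = i + 1 := by
              rcases hy with h | h
              · exact absurd (hx.trans h.symm) hxy
              · exact h
            rw [hx, hyv]
            have hw : mrWhile i [i, i + 1] 3 = some [i, i + 1] := by
              simp [mrWhile]
            simp [mrFor, hw, PySem.List.pop?_zero_cons, invCount,
              show ¬ (i > i + 1) by omega]
          · have hyv : y = i := by
              rcases hy with h | h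
              · exact h
              · exact absurd (h.trans hx.symm).symm hxy
            rw [hx, hyv]
            have hw : mrWhile i [i + 1, i] 3 = none := by
              simp [mrWhile, show i + 1 ≠ i by omega]
            have h1 : invCount [i + 1, i] = 1 := by
              simp [invCount]
            simp [mrFor, hw, h1]

lemma perm_of_checks (n : Int) (data : List Int) (hlen : (data.length : Int) = n)
    (hall : ∀ x : Int, 1 ≤ x → x ≤ n → x ∈ data) :
    data.Perm (PySem.List.pyRange 1 (n + 1)) := by
  have hsub : PySem.List.pyRange 1 (n + 1) ⊆ data := by
    intro x hx; rw [PySem.List.mem_pyRange_one] at hx; exact hall x hx.1 (by omega)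
  have hsp := List.subperm_of_subset (PySem.List.nodup_pyRange_one _ _) hsub
  exact (hsp.perm_of_length_le (by rw [PySem.List.length_pyRange_one]; omega)).symm

lemma MisterRobot_eq (n : Int) (data : List Int) : MisterRobot n data = MisterRobot_alt n data := by
  by_cases hn : n = (data.length : Int)
  · subst hn
    by_cases hall : ∀ x : Int, 1 ≤ x → x ≤ (data.length : Int) → x ∈ data
    · have hperm := perm_of_checks _ data rfl hall
      have hchk : ((PySem.List.pyRange 0 (data.length : Int)).all
          fun k => data.contains (k + 1)) = true := by
        rw [List.all_eq_true]
        intro k hk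
        rw [PySem.List.mem_pyRange_one] at hk
        simpa using hall (k + 1) (by omega) (by omega)
      have hset : PySem.Set.equal (PySem.Set.ofList data)
          (PySem.Set.ofList (PySem.List.pyRange 1 ((data.length : Int) + 1))) = true := by
        simp only [PySem.Set.equal, PySem.Set.issubset, PySem.Set.contains, Bool.and_eq_true,
          List.all_eq_true]
        constructor
        · intro x hx
          rw [PySem.Set.mem_ofList] at hx
          simp [PySem.Set.mem_ofList, hperm.mem_iff.mp hx]
        · intro x hx
          rw [PySem.Set.mem_ofList] at hx
          simp [PySem.Set.mem_ofList, hperm.mem_iff.mpr hx]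
      have hnd : data.Nodup := hperm.nodup_iff.mpr (PySem.List.nodup_pyRange_one _ _)
      have hmem : ∀ x, x ∈ data ↔ 1 ≤ x ∧ x ≤ (data.length : Int) := by
        intro x
        rw [hperm.mem_iff, PySem.List.mem_pyRange_one]
        omega
      simp only [MisterRobot, MisterRobot_alt, hchk, hset]
      norm_num
      by_cases h0 : 1 ≤ (data.length : Int)
      · exact mrFor_spec (data.length : Int) _ 1 data rfl le_rfl h0 hnd hmem
      · have hdata : data = [] := by
          cases data with
          | nil => rfl
          | cons x t => simp at h0
        subst hdata
        decide
    · push Not at hall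
      obtain ⟨x, hx1, hx2, hx3⟩ := hall
      have hset : PySem.Set.equal (PySem.Set.ofList data)
          (PySem.Set.ofList (PySem.List.pyRange 1 ((data.length : Int) + 1))) = false := by
        rw [Bool.eq_false_iff]
        intro hq
        simp only [PySem.Set.equal, PySem.Set.issubset, PySem.Set.contains, Bool.and_eq_true,
          List.all_eq_true] at hq
        have := hq.2 x (by rw [PySem.Set.mem_ofList, PySem.List.mem_pyRange_one]; omega)
        simp [PySem.Set.mem_ofList] at this
        exact hx3 this
      simp only [MisterRobot, MisterRobot_alt]
      rw [if_neg (by simp), if_pos (by simp; exact ⟨x - 1, by omega, by omega, by simpa using hx3⟩), if_pos (Or.inr (by simp [hset]))]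
  · simp [MisterRobot, MisterRobot_alt, hn]

-- ===== VERDICT (by name: the statement is the Claim_ definition above) =====
theorem MisterRobot_spec : Claim_equal_MisterRobot := fun n data _ => MisterRobot_eq n data
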